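-- pv_equiv track=rewrite | github.com/RudolfCardinal/pythonlib | cardinal_pythonlib/platformfunc.py | contains_unquoted_target
-- ===== SOURCE A (Python) =====
-- def contains_unquoted_target(x: str,
--                              quote: str = '"', target: str = '&') -> bool:
--     """
--     Checks if ``target`` exists in ``x`` outside quotes (as defined by
--     ``quote``). Principal use: from
--     :func:`contains_unquoted_ampersand_dangerous_to_windows`.
--     """
--     in_quote = False
--     for c in x:
--         if c == quote:
--             in_quote = not in_quote
--         elif c == target:
--             if not in_quote:
--                 return True
--     return False
-- ===== SOURCE B (Python) =====
-- def contains_unquoted_target(x: str,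
--                              quote: str = '"', target: str = '&') -> bool:
--     # A character equal to `quote` is a quote delimiter, never a target hit;
--     # a target character is unquoted iff an even number of quote characters
--     # precede it.
--     return any(
--         c == target and c != quote
--         and sum(ch == quote for ch in x[:i]) % 2 == 0
--         for i, c in enumerate(x)
--     )
-- ===== Notes on version B (the rewrite author's own statement) =====
-- stated objective: alternative
-- what changed: Replaces the stateful in_quote toggle with an early return by a stateless scan: for each position holding the target character, decide quotedness from the parity of the count of quote characters in the prefix.
import Mathlib
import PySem

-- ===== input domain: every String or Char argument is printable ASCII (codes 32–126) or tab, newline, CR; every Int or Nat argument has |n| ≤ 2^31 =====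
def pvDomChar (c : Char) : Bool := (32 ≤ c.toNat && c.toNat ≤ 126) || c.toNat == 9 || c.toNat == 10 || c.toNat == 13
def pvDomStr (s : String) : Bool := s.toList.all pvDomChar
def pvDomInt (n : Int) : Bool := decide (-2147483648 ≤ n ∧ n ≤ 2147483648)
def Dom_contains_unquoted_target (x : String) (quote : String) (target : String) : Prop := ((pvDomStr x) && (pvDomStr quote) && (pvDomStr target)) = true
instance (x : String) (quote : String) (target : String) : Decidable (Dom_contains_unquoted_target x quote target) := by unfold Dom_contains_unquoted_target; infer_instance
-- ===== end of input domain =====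

-- B replaces A's stateful in_quote toggle by a stateless position scan that tests
-- prefix quote-count parity at each target occurrence (objective: alternative).

-- ===== PORT A =====
-- A's loop over the characters of x with the in_quote flag, early return = true.
def pvGoA (q t : String) : List Char → Bool → Bool
  | [], _ => false
  | c :: rest, inq =>
    if String.mk [c] = q then pvGoA q t rest (!inq)
    else if String.mk [c] = t then
      (if !inq then true else pvGoA q t rest inq)
    else pvGoA q t rest inq

def contains_unquoted_target (x : String) (quote : String) (target : String) : Bool :=
  pvGoA quote target x.toList false

-- ===== PORT B =====
-- Source B: any over enumerate(x); sum(ch == quote for ch in x[:i]) is the countP of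
-- the slice x[:i] (a sum of 0/1 booleans); % 2 == 0 on that nonnegative count.
def contains_unquoted_target_alt (x : String) (quote : String) (target : String) : Bool :=
  (PySem.List.enumerate x.toList 0).any (fun ic =>
    decide (String.mk [ic.2] = target) && decide (¬ (String.mk [ic.2] = quote)) &&
    (((PySem.List.slice x.toList none (some ic.1)).countP
        (fun ch => decide (String.mk [ch] = quote))) % 2 == 0))

-- ===== PRECONDITION & SPEC =====
def Spec_contains_unquoted_target (x : String) (quote : String) (target : String) (out : Bool) : Prop := out = contains_unquoted_target_alt x quote target
instance (x : String) (quote : String) (target : String) (out : Bool) : Decidable (Spec_contains_unquoted_target x quote target out) := by unfold Spec_contains_unquoted_target; infer_instance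

-- ===== CLAIM (what is proved, stated in full; the proofs are below) =====
def Claim_equal_contains_unquoted_target : Prop := ∀ (x : String) (quote : String) (target : String), Dom_contains_unquoted_target x quote target → Spec_contains_unquoted_target x quote target (contains_unquoted_target x quote target)

-- ===== LEMMAS AND PROOFS =====

-- A's loop returns true iff some position k carries the target character, is not a
-- quote character, and the number of quote characters before it (plus the initial
-- in_quote flag) is even.
theorem pvGoA_cons (q t : String) (c : Char) (rest : List Char) (inq : Bool) :
    pvGoA q t (c :: rest) inq =
      if String.mk [c] = q then pvGoA q t rest (!inq)
      else if String.mk [c] = t then (if !inq then true else pvGoA q t rest inq)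
      else pvGoA q t rest inq := rfl

theorem pvGoA_eq_true_iff (q t : String) (l : List Char) (inq : Bool) :
    pvGoA q t l inq = true ↔
      ∃ k, ∃ h : k < l.length,
        String.mk [l[k]] = t ∧ ¬ (String.mk [l[k]] = q) ∧
        ((l.take k).countP (fun ch => decide (String.mk [ch] = q)) + (cond inq 1 0)) % 2 = 0 := by
  induction l generalizing inq with
  | nil => simp [pvGoA]
  | cons c rest ih =>
    by_cases hq : String.mk [c] = q
    · rw [show pvGoA q t (c :: rest) inq = pvGoA q t rest (!inq) by
        rw [pvGoA_cons, if_pos hq]]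
      rw [ih]
      constructor
      · rintro ⟨k, h, h1, h2, h3⟩
        refine ⟨k + 1, by simpa using h, by simpa using h1, by simpa using h2, ?_⟩
        simp only [List.take_succ_cons, List.countP_cons, decide_eq_true_eq, if_pos hq]
        cases inq <;> simp_all <;> omega
      · rintro ⟨k, h, h1, h2, h3⟩
        match k with
        | 0 => simp at h1 h2; exact absurd hq h2
        | k + 1 =>
          refine ⟨k, by simpa using h, by simpa using h1, by simpa using h2, ?_⟩
          simp only [List.take_succ_cons, List.countP_cons, decide_eq_true_eq, if_pos hq] at h3
          cases inq <;> simp_all <;> omega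
    · by_cases ht : String.mk [c] = t
      · cases inq with
        | false =>
          rw [show pvGoA q t (c :: rest) false = true by
            rw [pvGoA_cons, if_neg hq, if_pos ht]; rfl]
          simp only [true_iff]
          exact ⟨0, by simp, by simpa using ht, by simpa using hq, by simp⟩
        | true =>
          rw [show pvGoA q t (c :: rest) true = pvGoA q t rest true by
            rw [pvGoA_cons, if_neg hq, if_pos ht]; rfl]
          rw [ih]
          constructor
          · rintro ⟨k, h, h1, h2, h3⟩
            refine ⟨k + 1, by simpa using h, by simpa using h1, by simpa using h2, ?_⟩
            simp only [List.take_succ_cons, List.countP_cons, decide_eq_true_eq, if_neg hq]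
            simp_all
          · rintro ⟨k, h, h1, h2, h3⟩
            match k with
            | 0 => simp at h3
            | k + 1 =>
              refine ⟨k, by simpa using h, by simpa using h1, by simpa using h2, ?_⟩
              simp only [List.take_succ_cons, List.countP_cons, decide_eq_true_eq, if_neg hq] at h3
              simp_all
      · rw [show pvGoA q t (c :: rest) inq = pvGoA q t rest inq by
          rw [pvGoA_cons, if_neg hq, if_neg ht]]
        rw [ih]
        constructor
        · rintro ⟨k, h, h1, h2, h3⟩
          refine ⟨k + 1, by simpa using h, by simpa using h1, by simpa using h2, ?_⟩
          simp only [List.take_succ_cons, List.countP_cons, decide_eq_true_eq, if_neg hq]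
          simp_all
        · rintro ⟨k, h, h1, h2, h3⟩
          match k with
          | 0 => simp at h1; exact absurd h1 ht
          | k + 1 =>
            refine ⟨k, by simpa using h, by simpa using h1, by simpa using h2, ?_⟩
            simp only [List.take_succ_cons, List.countP_cons, decide_eq_true_eq, if_neg hq] at h3
            simp_all

theorem alt_eq_true_iff (x q t : String) :
    contains_unquoted_target_alt x q t = true ↔
      ∃ k, ∃ h : k < x.toList.length,
        String.mk [x.toList[k]] = t ∧ ¬ (String.mk [x.toList[k]] = q) ∧
        ((x.toList.take k).countP (fun ch => decide (String.mk [ch] = q))) % 2 = 0 := by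
  unfold contains_unquoted_target_alt
  rw [List.any_eq_true]
  constructor
  · rintro ⟨p, hp, hf⟩
    rw [PySem.List.mem_enumerate_iff] at hp
    obtain ⟨k, h, rfl⟩ := hp
    simp only [Bool.and_eq_true, decide_eq_true_eq, beq_iff_eq] at hf
    obtain ⟨⟨h1, h2⟩, h3⟩ := hf
    refine ⟨k, h, h1, h2, ?_⟩
    rwa [show ((0 : Int) + (k : Nat)) = ((k : Nat) : Int) by omega,
      PySem.List.slice_to_natCast] at h3
  · rintro ⟨k, h, h1, h2, h3⟩
    refine ⟨((0 : Int) + (k : Nat), x.toList[k]), ?_, ?_⟩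
    · rw [PySem.List.mem_enumerate_iff]; exact ⟨k, h, rfl⟩
    · simp only [Bool.and_eq_true, decide_eq_true_eq, beq_iff_eq]
      refine ⟨⟨h1, h2⟩, ?_⟩
      rwa [show ((0 : Int) + (k : Nat)) = ((k : Nat) : Int) by omega,
        PySem.List.slice_to_natCast]

-- ===== VERDICT (by name: the statement is the Claim_ definition above) =====
theorem contains_unquoted_target_spec : Claim_equal_contains_unquoted_target := by
  intro x quote target _
  unfold Spec_contains_unquoted_target contains_unquoted_target
  apply Bool.eq_iff_iff.mpr
  rw [pvGoA_eq_true_iff, alt_eq_true_iff]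
  simp
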